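-- pv_equiv track=rewrite | github.com/dominikjalowiecki/Programming-Projects | python/ex_traveling_robot/skrypt.py | policz_graczy_zdyskfalifikowanych
-- ===== SOURCE A (Python) =====
-- def wykonaj_ruch(ruch, pozycja):
--     if ruch == 'N':
--         pozycja[0] -= 1
--     if ruch == 'E':
--         pozycja[1] += 1
--     if ruch == 'S':
--         pozycja[0] += 1
--     if ruch == 'W':
--         pozycja[1] -= 1
--
-- def policz_graczy_zdyskfalifikowanych(ruchy, plansza):
--     pozycja = [0, 0]
--     licznik = 0
--
--     for ruchy_gracza in ruchy:
--         pozycja = [0, 0]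
--         for ruch in ruchy_gracza:
--             wykonaj_ruch(ruch, pozycja)
--             if (pozycja[0] < 0 or pozycja[0] > 19) or (pozycja[1] < 0 or pozycja[1] > 19):
--                 licznik += 1
--                 break
--
--     return licznik
-- ===== SOURCE B (Python) =====
-- def policz_graczy_zdyskfalifikowanych(ruchy, plansza):
--     delty = {'N': (-1, 0), 'E': (0, 1), 'S': (1, 0), 'W': (0, -1)}
--     licznik = 0
--     for ruchy_gracza in ruchy:
--         r = c = 0
--         min_r = max_r = min_c = max_c = 0
--         for ruch in ruchy_gracza:
--             dr, dc = delty.get(ruch, (0, 0))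
--             r += dr
--             c += dc
--             min_r = min(min_r, r)
--             max_r = max(max_r, r)
--             min_c = min(min_c, c)
--             max_c = max(max_c, c)
--         if min_r < 0 or max_r > 19 or min_c < 0 or max_c > 19:
--             licznik += 1
--     return licznik
-- ===== Notes on version B (the rewrite author's own statement) =====
-- stated objective: alternative
-- what changed: B replaces A's step-by-step bounds test with break by a full walk that accumulates the cumulative row/col and their running min/max per player, deciding disqualification once at the end from the extremes.
import Mathlib
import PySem

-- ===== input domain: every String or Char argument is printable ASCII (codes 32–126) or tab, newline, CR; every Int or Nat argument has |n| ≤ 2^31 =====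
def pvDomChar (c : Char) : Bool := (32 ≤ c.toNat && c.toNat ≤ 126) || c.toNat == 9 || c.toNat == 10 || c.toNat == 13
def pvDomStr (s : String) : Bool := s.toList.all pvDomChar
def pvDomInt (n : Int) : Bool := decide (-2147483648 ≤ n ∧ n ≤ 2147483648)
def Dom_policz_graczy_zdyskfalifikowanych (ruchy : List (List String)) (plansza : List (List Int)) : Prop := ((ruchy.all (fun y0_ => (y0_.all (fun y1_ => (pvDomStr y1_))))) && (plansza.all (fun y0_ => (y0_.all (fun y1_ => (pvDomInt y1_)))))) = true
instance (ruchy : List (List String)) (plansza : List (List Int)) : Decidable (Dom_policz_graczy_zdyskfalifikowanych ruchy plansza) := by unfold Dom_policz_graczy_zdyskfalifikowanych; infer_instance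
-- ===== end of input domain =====

-- B replaces A's per-step bounds test with break by accumulating cumulative row/col
-- and their running min/max per player, deciding disqualification once at the end (alternative decomposition).

-- ===== PORT A =====
def wykonaj_ruch (ruch : String) (pozycja : Int × Int) : Int × Int :=
  let p := if ruch == "N" then (pozycja.1 - 1, pozycja.2) else pozycja
  let p := if ruch == "E" then (p.1, p.2 + 1) else p
  let p := if ruch == "S" then (p.1 + 1, p.2) else p
  if ruch == "W" then (p.1, p.2 - 1) else p

-- A's inner loop with its break: returns whether the player went out of bounds
def aDis : List String → Int × Int → Bool
  | [], _ => false
  | ruch :: rest, pozycja =>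
    let p := wykonaj_ruch ruch pozycja
    if p.1 < 0 ∨ p.1 > 19 ∨ p.2 < 0 ∨ p.2 > 19 then true else aDis rest p

def policz_graczy_zdyskfalifikowanych (ruchy : List (List String)) (plansza : List (List Int)) : Int :=
  ruchy.foldl (fun licznik ruchy_gracza =>
    if aDis ruchy_gracza (0, 0) then licznik + 1 else licznik) 0

-- ===== PORT B =====
def delta (ruch : String) : Int × Int :=
  if ruch == "N" then (-1, 0)
  else if ruch == "E" then (0, 1)
  else if ruch == "S" then (1, 0)
  else if ruch == "W" then (0, -1)
  else (0, 0)

-- state: (r, c, min_r, max_r, min_c, max_c)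
def bStep (s : Int × Int × Int × Int × Int × Int) (ruch : String) :
    Int × Int × Int × Int × Int × Int :=
  let d := delta ruch
  let r := s.1 + d.1
  let c := s.2.1 + d.2
  (r, c, min s.2.2.1 r, max s.2.2.2.1 r, min s.2.2.2.2.1 c, max s.2.2.2.2.2 c)

def policz_graczy_zdyskfalifikowanych_alt (ruchy : List (List String)) (plansza : List (List Int)) : Int :=
  ruchy.foldl (fun licznik ruchy_gracza =>
    let s := ruchy_gracza.foldl bStep (0, 0, 0, 0, 0, 0)
    if s.2.2.1 < 0 ∨ s.2.2.2.1 > 19 ∨ s.2.2.2.2.1 < 0 ∨ s.2.2.2.2.2 > 19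
    then licznik + 1 else licznik) 0

-- ===== PRECONDITION & SPEC =====
def Spec_policz_graczy_zdyskfalifikowanych (ruchy : List (List String)) (plansza : List (List Int)) (out : Int) : Prop := out = policz_graczy_zdyskfalifikowanych_alt ruchy plansza
instance (ruchy : List (List String)) (plansza : List (List Int)) (out : Int) : Decidable (Spec_policz_graczy_zdyskfalifikowanych ruchy plansza out) := by unfold Spec_policz_graczy_zdyskfalifikowanych; infer_instance

-- ===== CLAIM (what is proved, stated in full; the proofs are below) =====
def Claim_equal_policz_graczy_zdyskfalifikowanych : Prop := ∀ (ruchy : List (List String)) (plansza : List (List Int)), Dom_policz_graczy_zdyskfalifikowanych ruchy plansza → Spec_policz_graczy_zdyskfalifikowanych ruchy plansza (policz_graczy_zdyskfalifikowanych ruchy plansza)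

-- ===== LEMMAS AND PROOFS =====

-- wykonaj_ruch is exactly "add the delta"
theorem wykonaj_ruch_delta (ruch : String) (p : Int × Int) :
    wykonaj_ruch ruch p = (p.1 + (delta ruch).1, p.2 + (delta ruch).2) := by
  by_cases hN : ruch = "N" <;> by_cases hE : ruch = "E" <;>
  by_cases hS : ruch = "S" <;> by_cases hW : ruch = "W" <;>
  simp_all [wykonaj_ruch, delta, sub_eq_add_neg]

-- the running min only shrinks and the running max only grows along the fold
theorem fold_mono (ms : List String) :
    ∀ s : Int × Int × Int × Int × Int × Int,
      (ms.foldl bStep s).2.2.1 ≤ s.2.2.1 ∧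
      s.2.2.2.1 ≤ (ms.foldl bStep s).2.2.2.1 ∧
      (ms.foldl bStep s).2.2.2.2.1 ≤ s.2.2.2.2.1 ∧
      s.2.2.2.2.2 ≤ (ms.foldl bStep s).2.2.2.2.2 := by
  induction ms with
  | nil => intro s; simp
  | cons m t ih =>
    intro s
    have h := ih (bStep s m)
    simp only [List.foldl_cons]
    refine ⟨h.1.trans ?_, le_trans ?_ h.2.1, h.2.2.1.trans ?_, le_trans ?_ h.2.2.2⟩ <;>
      simp [bStep]

-- key invariant: starting from an in-bounds position with in-bounds extremes,
-- A's break-loop answer equals B's final-extremes test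
theorem key (ms : List String) :
    ∀ (r c a b d e : Int), 0 ≤ a → b ≤ 19 → 0 ≤ d → e ≤ 19 →
      0 ≤ r → r ≤ 19 → 0 ≤ c → c ≤ 19 →
      (aDis ms (r, c) = true ↔
        ((ms.foldl bStep (r, c, a, b, d, e)).2.2.1 < 0 ∨
         (ms.foldl bStep (r, c, a, b, d, e)).2.2.2.1 > 19 ∨
         (ms.foldl bStep (r, c, a, b, d, e)).2.2.2.2.1 < 0 ∨
         (ms.foldl bStep (r, c, a, b, d, e)).2.2.2.2.2 > 19)) := by
  induction ms with
  | nil =>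
    intro r c a b d e ha hb hd he _ _ _ _
    simp [aDis]; omega
  | cons m t ih =>
    intro r c a b d e ha hb hd he hr1 hr2 hc1 hc2
    have hwr := wykonaj_ruch_delta m (r, c)
    simp only [List.foldl_cons]
    have hstep : bStep (r, c, a, b, d, e) m =
        (r + (delta m).1, c + (delta m).2,
         min a (r + (delta m).1), max b (r + (delta m).1),
         min d (c + (delta m).2), max e (c + (delta m).2)) := by
      simp [bStep]
    rw [hstep]
    set r' := r + (delta m).1 with hr'
    set c' := c + (delta m).2 with hc'
    by_cases hout : r' < 0 ∨ r' > 19 ∨ c' < 0 ∨ c' > 19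
    · -- A returns true immediately; B's final extremes must violate bounds
      have hA : aDis (m :: t) (r, c) = true := by
        simp only [aDis, hwr]
        rw [if_pos]
        exact hout
      rw [hA]
      have hmono := fold_mono t (r', c', min a r', max b r', min d c', max e c')
      simp only [true_iff]
      rcases hout with h | h | h | h
      · exact Or.inl (lt_of_le_of_lt (hmono.1.trans (min_le_right _ _)) h)
      · exact Or.inr (Or.inl (lt_of_lt_of_le h ((le_max_right _ _).trans hmono.2.1)))
      · exact Or.inr (Or.inr (Or.inl (lt_of_le_of_lt (hmono.2.2.1.trans (min_le_right _ _)) h)))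
      · exact Or.inr (Or.inr (Or.inr (lt_of_lt_of_le h ((le_max_right _ _).trans hmono.2.2.2))))
    · -- A continues from the new in-bounds position; apply the IH to the new state
      push Not at hout
      have hA : aDis (m :: t) (r, c) = aDis t (r', c') := by
        simp only [aDis, hwr]
        rw [if_neg]
        omega
      rw [hA]
      exact ih r' c' (min a r') (max b r') (min d c') (max e c')
        (le_min ha hout.1) (max_le hb (by omega)) (le_min hd hout.2.2.1)
        (max_le he (by omega)) hout.1 (by omega) hout.2.2.1 (by omega)

-- the two per-player step functions agree
theorem step_eq (l : Int) (rg : List String) :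
    (if aDis rg (0, 0) then l + 1 else l) =
    (let s := rg.foldl bStep (0, 0, 0, 0, 0, 0)
     if s.2.2.1 < 0 ∨ s.2.2.2.1 > 19 ∨ s.2.2.2.2.1 < 0 ∨ s.2.2.2.2.2 > 19
     then l + 1 else l) := by
  have hk := key rg 0 0 0 0 0 0 (by omega) (by omega) (by omega) (by omega)
    (by omega) (by omega) (by omega) (by omega)
  simp only []
  split_ifs with h1 h2 h2
  · rfl
  · exact absurd (hk.mp h1) h2
  · exact absurd (hk.mpr h2) (by simpa using h1)
  · rfl

theorem fold_eq (ruchy : List (List String)) :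
    ∀ l : Int,
      ruchy.foldl (fun licznik rg => if aDis rg (0, 0) then licznik + 1 else licznik) l =
      ruchy.foldl (fun licznik rg =>
        let s := rg.foldl bStep (0, 0, 0, 0, 0, 0)
        if s.2.2.1 < 0 ∨ s.2.2.2.1 > 19 ∨ s.2.2.2.2.1 < 0 ∨ s.2.2.2.2.2 > 19
        then licznik + 1 else licznik) l := by
  induction ruchy with
  | nil => intro l; rfl
  | cons rg t ih =>
    intro l
    simp only [List.foldl_cons]
    rw [step_eq l rg]
    exact ih _

-- ===== VERDICT (by name: the statement is the Claim_ definition above) =====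
theorem policz_graczy_zdyskfalifikowanych_spec : Claim_equal_policz_graczy_zdyskfalifikowanych := by
  unfold Claim_equal_policz_graczy_zdyskfalifikowanych
  intro ruchy plansza _
  unfold Spec_policz_graczy_zdyskfalifikowanych
  unfold policz_graczy_zdyskfalifikowanych policz_graczy_zdyskfalifikowanych_alt
  exact fold_eq ruchy 0
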